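-- pv_equiv track=rewrite | github.com/BatFresh/ICC_algorithm_implement | Dataset.py | get_succ_from_pre
-- ===== SOURCE A (Python) =====
-- def get_succ_from_pre(pre):
--     succ = []
--
--     for tmptask in range(len(pre)):
--         task_succ = []
--
--         for i,tmp in enumerate(pre):
--             if tmptask in tmp:
--                 task_succ.append(i)
--         succ.append(task_succ)
--
--     return succ
-- ===== SOURCE B (Python) =====
-- def get_succ_from_pre(pre):
--     n = len(pre)
--     succ = [[] for _ in range(n)]
--     for i, tmp in enumerate(pre):
--         seen = set()
--         for t in tmp:
--             if 0 <= t < n and t not in seen: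
--                 seen.add(t)
--                 succ[t].append(i)
--     return succ
-- ===== Notes on version B (the rewrite author's own statement) =====
-- stated objective: faster
-- what changed: Instead of scanning all predecessor lists once per task (nested loops), B makes a single pass over the rows, appending each row index i to succ[t] for every distinct in-range t in pre[i].
import Mathlib
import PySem

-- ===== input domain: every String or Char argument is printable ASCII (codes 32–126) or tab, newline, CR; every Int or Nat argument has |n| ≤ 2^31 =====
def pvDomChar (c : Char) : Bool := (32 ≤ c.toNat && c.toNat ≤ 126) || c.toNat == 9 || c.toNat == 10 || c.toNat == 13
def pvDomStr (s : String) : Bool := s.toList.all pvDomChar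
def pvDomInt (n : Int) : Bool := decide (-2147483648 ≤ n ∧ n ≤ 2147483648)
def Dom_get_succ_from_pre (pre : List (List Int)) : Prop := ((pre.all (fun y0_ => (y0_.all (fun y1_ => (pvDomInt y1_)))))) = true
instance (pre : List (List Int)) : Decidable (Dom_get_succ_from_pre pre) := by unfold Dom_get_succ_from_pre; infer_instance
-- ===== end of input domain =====

-- B replaces A's nested scan (one pass over all rows per task) by a single pass over the rows,
-- appending each row index i to succ[t] for every distinct in-range t of pre[i]; asymptotically faster in a timing run.

-- ===== PORT A =====
def get_succ_from_pre (pre : List (List Int)) : List (List Int) :=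
  (PySem.List.pyRange 0 (pre.length : Int) 1).foldl
    (fun succ tmptask =>
      succ ++ [ (PySem.List.enumerate pre).foldl
        (fun task_succ p => if tmptask ∈ p.2 then task_succ ++ [p.1] else task_succ) [] ])
    []

-- ===== PORT B =====
-- inner loop of B: 'for t in tmp: if 0 <= t < n and t not in seen: seen.add(t); succ[t].append(i)'
def pvInnerB (n i : Int) : List Int → List (List Int) × PySem.Set Int → List (List Int) × PySem.Set Int
  | [], st => st
  | t :: ts, (succ, seen) =>
    if 0 ≤ t ∧ t < n ∧ ¬ PySem.Set.contains seen t then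
      pvInnerB n i ts (PySem.List.pySetD succ t (PySem.List.pyGetD succ t [] ++ [i]), PySem.Set.add seen t)
    else
      pvInnerB n i ts (succ, seen)

def get_succ_from_pre_alt (pre : List (List Int)) : List (List Int) :=
  (PySem.List.enumerate pre).foldl
    (fun succ p => (pvInnerB (pre.length : Int) p.1 p.2 (succ, PySem.Set.empty)).1)
    (List.replicate pre.length [])

-- ===== PRECONDITION & SPEC =====
def Spec_get_succ_from_pre (pre : List (List Int)) (out : List (List Int)) : Prop := out = get_succ_from_pre_alt pre
instance (pre : List (List Int)) (out : List (List Int)) : Decidable (Spec_get_succ_from_pre pre out) := by unfold Spec_get_succ_from_pre; infer_instance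

-- ===== CLAIM (what is proved, stated in full; the proofs are below) =====
def Claim_equal_get_succ_from_pre : Prop := ∀ (pre : List (List Int)), Dom_get_succ_from_pre pre → Spec_get_succ_from_pre pre (get_succ_from_pre pre)

-- ===== LEMMAS AND PROOFS =====

theorem pvInnerB_length (n i : Int) (tmp : List Int) (succ : List (List Int)) (seen : PySem.Set Int) :
    ((pvInnerB n i tmp (succ, seen)).1).length = succ.length := by
  induction tmp generalizing succ seen with
  | nil => rfl
  | cons t ts ih =>
    simp only [pvInnerB]
    split
    · rename_i h
      rw [ih, PySem.List.pySetD_of_nonneg _ _ h.1, List.length_set]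
    · exact ih succ seen

theorem pvInnerB_get (n i : Int) (tmp : List Int) (succ : List (List Int)) (seen : PySem.Set Int)
    (hn : (succ.length : Int) = n) (k : Nat) :
    ((pvInnerB n i tmp (succ, seen)).1)[k]? =
      if (k : Int) ∈ tmp ∧ (k : Int) ∉ seen then
        succ[k]?.map (· ++ [i])
      else succ[k]? := by
  induction tmp generalizing succ seen with
  | nil => simp [pvInnerB]
  | cons t ts ih =>
    simp only [pvInnerB]
    split
    · rename_i h
      obtain ⟨h0, hlt, hns⟩ := h
      have hns' : t ∉ seen := by
        intro hmem; exact hns (by simp [PySem.Set.contains, hmem])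
      have htlen : t.toNat < succ.length := by omega
      rw [PySem.List.pySetD_of_nonneg _ _ h0]
      have hget : PySem.List.pyGetD succ t [] = succ[t.toNat] := by
        rw [PySem.List.pyGetD_of_nonneg _ _ h0]
        simp [htlen]
      rw [ih _ _ (by simp; omega)]
      by_cases hk : (k : Int) = t
      · have hkt : k = t.toNat := by omega
        have hkc : (k : Int) ∈ PySem.Set.add seen t := by
          rw [PySem.Set.mem_add]; right; exact hk
        simp only [hkc, not_true_eq_false, and_false, if_false]
        rw [hkt, List.getElem?_set_self htlen]
        have ht' : ((t.toNat : Int)) = t := by omega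
        simp [ht', hns', hget, List.getElem?_eq_getElem htlen]
      · have hkt : k ≠ t.toNat := by omega
        rw [List.getElem?_set_ne (by omega)]
        have hcont : ((k : Int) ∈ PySem.Set.add seen t) ↔ ((k : Int) ∈ seen) := by
          rw [PySem.Set.mem_add]; simp [hk]
        by_cases hc : (k : Int) ∈ ts ∧ (k : Int) ∉ seen
        · have : ((k : Int) ∈ t :: ts ∧ (k : Int) ∉ seen) := ⟨by simp [hc.1], hc.2⟩
          simp [hc.1, hcont, hc.2, this]
        · have h2 : ¬ ((k : Int) ∈ ts ∧ (k : Int) ∉ PySem.Set.add seen t) := by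
            rw [hcont]; exact hc
          have h3 : ¬ ((k : Int) ∈ t :: ts ∧ (k : Int) ∉ seen) := by
            rintro ⟨hm, hs⟩
            exact hc ⟨by rcases List.mem_cons.mp hm with h | h; exact absurd h hk; exact h, hs⟩
          rw [if_neg h2, if_neg h3]
    · rename_i h
      rw [ih _ _ hn]
      by_cases hk : (k : Int) = t
      · have h0 : (0 : Int) ≤ t := by omega
        by_cases hlt : t < n
        · have hs : t ∈ seen := by
            by_contra hs
            exact h ⟨h0, hlt, by simp [PySem.Set.contains, hs]⟩
          have hs' : (k : Int) ∈ seen := hk ▸ hs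
          simp [hs']
        · have hnone : succ[k]? = none := by
            apply List.getElem?_eq_none; omega
          simp [hnone]
      · simp [List.mem_cons, hk]

theorem pvOuter_get (n : Int) (rows : List (Int × List Int)) (succ : List (List Int))
    (hn : (succ.length : Int) = n) (k : Nat) :
    (rows.foldl (fun s p => (pvInnerB n p.1 p.2 (s, PySem.Set.empty)).1) succ)[k]? =
      succ[k]?.map (· ++ (rows.filter (fun p => decide ((k : Int) ∈ p.2))).map (·.1)) := by
  induction rows generalizing succ with
  | nil => cases h : succ[k]? <;> simp [h]
  | cons r rs ih =>
    obtain ⟨i, tmp⟩ := r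
    simp only [List.foldl_cons]
    rw [ih _ (by rw [pvInnerB_length]; exact hn)]
    rw [pvInnerB_get n i tmp succ PySem.Set.empty hn k]
    by_cases hm : (k : Int) ∈ tmp
    · have hne : ((k : Int) ∉ (PySem.Set.empty : PySem.Set Int)) := by simp [PySem.Set.empty]
      simp only [hm, hne, and_self, not_false_eq_true, if_pos, List.filter_cons,
        decide_eq_true_eq, List.map_cons]
      cases h : succ[k]? <;> simp
    · simp only [hm, false_and, if_false, List.filter_cons]
      simp

-- ===== VERDICT (by name: the statement is the Claim_ definition above) =====
theorem get_succ_from_pre_spec : Claim_equal_get_succ_from_pre := by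
  intro pre _
  unfold Spec_get_succ_from_pre get_succ_from_pre get_succ_from_pre_alt
  rw [PySem.List.foldl_append_singleton_eq_map]
  simp only [List.nil_append]
  apply List.ext_getElem?
  intro k
  rw [pvOuter_get (pre.length : Int) (PySem.List.enumerate pre) (List.replicate pre.length []) (by simp) k]
  by_cases hk : k < pre.length
  · rw [List.getElem?_map, PySem.List.getElem?_pyRange_one, if_pos (by omega : k < ((pre.length : Int) - 0).toNat)]
    rw [List.getElem?_replicate, if_pos hk]
    simp only [Option.map_some, List.nil_append, Option.some.injEq, Int.zero_add]
    rw [PySem.List.foldl_append_ite]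
    simp
  · rw [List.getElem?_eq_none (by rw [List.length_map, PySem.List.length_pyRange_one]; omega),
        List.getElem?_replicate, if_neg hk]
    rfl
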